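-- pv_equiv track=rewrite | github.com/yetigong/trading-agent | trading_agent/portfolio/rebalancer.py | _parse_rebalancing_plan
-- ===== SOURCE A (Python) =====
-- from typing import Dict, List, Any, Optional
--
-- def _parse_rebalancing_plan(llm_response: str) -> Dict[str, Any]:
--     """
--     Parse LLM response into structured rebalancing plan.
--     """
--     plan = {}
--     lines = llm_response.split('\n')
--
--     current_section = None
--     current_content = []
--
--     for line in lines:
--         line = line.strip()
--         if line.startswith('1. Target Allocation'):
--             if current_section:
--                 plan[current_section] = '\n'.join(current_content)
--             current_section = 'target_allocation'
--             current_content = []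
--         elif line.startswith('2. Required Changes'):
--             if current_section:
--                 plan[current_section] = '\n'.join(current_content)
--             current_section = 'required_changes'
--             current_content = []
--         elif line.startswith('3. Reasoning'):
--             if current_section:
--                 plan[current_section] = '\n'.join(current_content)
--             current_section = 'reasoning'
--             current_content = []
--         elif line and current_section:
--             current_content.append(line)
--
--     if current_section:
--         plan[current_section] = '\n'.join(current_content)
--
--     return plan
-- ===== SOURCE B (Python) =====
-- def _parse_rebalancing_plan(llm_response: str):
--     """
--     Parse LLM response into structured rebalancing plan.
--
--     Segment-based rewrite: strip all lines up front, drop the preamble before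
--     the first header, then cut the remainder into (header, body) segments and
--     assign each joined body to its section key (later duplicates overwrite).
--     """
--     HEADERS = [('1. Target Allocation', 'target_allocation'),
--                ('2. Required Changes', 'required_changes'),
--                ('3. Reasoning', 'reasoning')]
--
--     def key_of(line):
--         for pfx, key in HEADERS:
--             if line.startswith(pfx):
--                 return key
--         return None
--
--     lines = [l.strip() for l in llm_response.split('\n')]
--     plan = {}
--
--     # drop everything before the first header line
--     rest = lines
--     while rest and key_of(rest[0]) is None:
--         rest = rest[1:]
--
--     # cut the remainder into (header, body) segments
--     while rest:
--         key = key_of(rest[0])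
--         body = rest[1:]
--         n = 0
--         while n < len(body) and key_of(body[n]) is None:
--             n += 1
--         plan[key] = '\n'.join(l for l in body[:n] if l)
--         rest = body[n:]
--     return plan
-- ===== Notes on version B (the rewrite author's own statement) =====
-- stated objective: alternative
-- what changed: Replaces A's streaming accumulate-and-flush state machine (current_section/current_content mutated per line) with a segment decomposition: strip all lines up front, drop the preamble before the first header, then cut the list into (header, body) segments and assign each joined non-empty body to its key.
import Mathlib
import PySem

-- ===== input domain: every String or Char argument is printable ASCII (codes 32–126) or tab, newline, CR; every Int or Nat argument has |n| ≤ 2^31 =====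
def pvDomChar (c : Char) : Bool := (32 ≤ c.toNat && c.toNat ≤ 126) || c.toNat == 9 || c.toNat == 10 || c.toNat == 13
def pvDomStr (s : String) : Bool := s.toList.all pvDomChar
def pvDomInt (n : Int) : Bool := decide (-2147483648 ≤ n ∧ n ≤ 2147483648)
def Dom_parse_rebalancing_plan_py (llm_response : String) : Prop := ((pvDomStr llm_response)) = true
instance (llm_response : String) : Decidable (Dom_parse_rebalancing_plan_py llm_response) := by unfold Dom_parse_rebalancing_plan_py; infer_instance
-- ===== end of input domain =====

-- B replaces A's streaming accumulate-and-flush state machine with a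
-- segment decomposition (drop preamble, then cut into header/body segments);
-- same cost, alternative structure.


-- ===== PORT A =====
-- the loop body of A: strip the line, then the 4-way branch over the state triple
-- (plan, current_section, current_content)
def pvStepA (st : PySem.Dict String String × Option String × List String) (line0 : String) :
    PySem.Dict String String × Option String × List String :=
  let line := PySem.Str.strip line0
  if PySem.Str.startswith line "1. Target Allocation" then
    ((match st.2.1 with
      | some s => st.1.insert s (PySem.Str.join "\n" st.2.2)
      | none => st.1), some "target_allocation", [])
  else if PySem.Str.startswith line "2. Required Changes" then
    ((match st.2.1 with
      | some s => st.1.insert s (PySem.Str.join "\n" st.2.2)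
      | none => st.1), some "required_changes", [])
  else if PySem.Str.startswith line "3. Reasoning" then
    ((match st.2.1 with
      | some s => st.1.insert s (PySem.Str.join "\n" st.2.2)
      | none => st.1), some "reasoning", [])
  else if line != "" && st.2.1.isSome then
    (st.1, st.2.1, st.2.2 ++ [line])
  else st

-- llm_response.split('\n'): the separator is the literal "\n" ≠ "", so split? is always some
def parse_rebalancing_plan_py (llm_response : String) : List (String × String) :=
  let lines := (PySem.Str.split? llm_response "\n").getD []
  let st := lines.foldl pvStepA (PySem.Dict.empty, none, [])
  (match st.2.1 with
   | some s => st.1.insert s (PySem.Str.join "\n" st.2.2)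
   | none => st.1).items

-- ===== PORT B =====
-- B's key_of helper: which section key a (stripped) line opens, if any
def pvKeyOf (line : String) : Option String :=
  if PySem.Str.startswith line "1. Target Allocation" then some "target_allocation"
  else if PySem.Str.startswith line "2. Required Changes" then some "required_changes"
  else if PySem.Str.startswith line "3. Reasoning" then some "reasoning"
  else none

-- B's outer segment loop: head is a header, its body runs to the next header
def pvSegments (plan : PySem.Dict String String) : List String → PySem.Dict String String
  | [] => plan
  | h :: rest =>
    match pvKeyOf h with
    | some k =>
        pvSegments
          (plan.insert k (PySem.Str.join "\n"
            ((rest.takeWhile (fun l => (pvKeyOf l).isNone)).filter (fun l => l != ""))))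
          (rest.dropWhile (fun l => (pvKeyOf l).isNone))
    | none =>  -- unreachable: the loop is only entered at a header line
        pvSegments plan (rest.dropWhile (fun l => (pvKeyOf l).isNone))
termination_by ls => ls.length
decreasing_by all_goals
  simpa using Nat.lt_succ_of_le (List.length_dropWhile_le _ _)

def parse_rebalancing_plan_py_alt (llm_response : String) : List (String × String) :=
  let lines := ((PySem.Str.split? llm_response "\n").getD []).map PySem.Str.strip
  (pvSegments PySem.Dict.empty (lines.dropWhile (fun l => (pvKeyOf l).isNone))).items

-- ===== PRECONDITION & SPEC =====
def Spec_parse_rebalancing_plan_py (llm_response : String) (out : List (String × String)) : Prop := out = parse_rebalancing_plan_py_alt llm_response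
instance (llm_response : String) (out : List (String × String)) : Decidable (Spec_parse_rebalancing_plan_py llm_response out) := by unfold Spec_parse_rebalancing_plan_py; infer_instance

-- ===== CLAIM (what is proved, stated in full; the proofs are below) =====
def Claim_equal_parse_rebalancing_plan_py : Prop := ∀ (llm_response : String), Dom_parse_rebalancing_plan_py llm_response → Spec_parse_rebalancing_plan_py llm_response (parse_rebalancing_plan_py llm_response)

-- ===== LEMMAS AND PROOFS =====

-- A's step on an already-stripped line (pvStepA st l = pvStepA' st (strip l))
def pvStepA' (st : PySem.Dict String String × Option String × List String) (line : String) :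
    PySem.Dict String String × Option String × List String :=
  if PySem.Str.startswith line "1. Target Allocation" then
    ((match st.2.1 with
      | some s => st.1.insert s (PySem.Str.join "\n" st.2.2)
      | none => st.1), some "target_allocation", [])
  else if PySem.Str.startswith line "2. Required Changes" then
    ((match st.2.1 with
      | some s => st.1.insert s (PySem.Str.join "\n" st.2.2)
      | none => st.1), some "required_changes", [])
  else if PySem.Str.startswith line "3. Reasoning" then
    ((match st.2.1 with
      | some s => st.1.insert s (PySem.Str.join "\n" st.2.2)
      | none => st.1), some "reasoning", [])
  else if line != "" && st.2.1.isSome then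
    (st.1, st.2.1, st.2.2 ++ [line])
  else st

-- A's final flush
def pvFinish (st : PySem.Dict String String × Option String × List String) :
    PySem.Dict String String :=
  match st.2.1 with
  | some s => st.1.insert s (PySem.Str.join "\n" st.2.2)
  | none => st.1

-- with a current section k and accumulated content acc, A's remaining run closes
-- section k with acc plus the non-empty lines up to the next header, then continues
-- segment-wise from that header: exactly B's loop
lemma pvRun_some (ls : List String) :
    ∀ (plan : PySem.Dict String String) (k : String) (acc : List String),
    pvFinish (ls.foldl pvStepA' (plan, some k, acc)) =
      pvSegments (plan.insert k (PySem.Str.join "\n"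
          (acc ++ (ls.takeWhile (fun l => (pvKeyOf l).isNone)).filter (fun l => l != ""))))
        (ls.dropWhile (fun l => (pvKeyOf l).isNone)) := by
  induction ls with
  | nil => intro plan k acc; simp [pvFinish, pvSegments]
  | cons h t ih =>
    intro plan k acc
    by_cases h1 : PySem.Str.startswith h "1. Target Allocation" = true
    · simp [List.foldl_cons, pvStepA', h1, ih, pvKeyOf,
        pvSegments, -PySem.Str.startswith_eq]
    · by_cases h2 : PySem.Str.startswith h "2. Required Changes" = true
      · simp [List.foldl_cons, pvStepA', h1, h2, ih, pvKeyOf,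
          pvSegments, -PySem.Str.startswith_eq]
      · by_cases h3 : PySem.Str.startswith h "3. Reasoning" = true
        · simp [List.foldl_cons, pvStepA', h1, h2, h3, ih, pvKeyOf,
            pvSegments, -PySem.Str.startswith_eq]
        · by_cases he : h = ""
          · subst he
            simp [List.foldl_cons, pvStepA', h1, h2, h3, ih, pvKeyOf,
              -PySem.Str.startswith_eq]
          · simp [List.foldl_cons, pvStepA', h1, h2, h3, he, ih, pvKeyOf,
              -PySem.Str.startswith_eq]

-- before any header is seen, A only skips lines; B drops them with dropWhile
lemma pvRun_none (ls : List String) :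
    ∀ (plan : PySem.Dict String String),
    pvFinish (ls.foldl pvStepA' (plan, none, [])) =
      pvSegments plan (ls.dropWhile (fun l => (pvKeyOf l).isNone)) := by
  induction ls with
  | nil => intro plan; simp [pvFinish, pvSegments]
  | cons h t ih =>
    intro plan
    by_cases h1 : PySem.Str.startswith h "1. Target Allocation" = true
    · simp [List.foldl_cons, pvStepA', h1, pvRun_some, pvKeyOf, pvSegments,
        -PySem.Str.startswith_eq]
    · by_cases h2 : PySem.Str.startswith h "2. Required Changes" = true
      · simp [List.foldl_cons, pvStepA', h1, h2, pvRun_some, pvKeyOf,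
          pvSegments, -PySem.Str.startswith_eq]
      · by_cases h3 : PySem.Str.startswith h "3. Reasoning" = true
        · simp [List.foldl_cons, pvStepA', h1, h2, h3, pvRun_some, pvKeyOf,
            pvSegments, -PySem.Str.startswith_eq]
        · simp [List.foldl_cons, pvStepA', h1, h2, h3, ih, pvKeyOf,
            -PySem.Str.startswith_eq]

-- ===== VERDICT (by name: the statement is the Claim_ definition above) =====
theorem parse_rebalancing_plan_py_spec : Claim_equal_parse_rebalancing_plan_py := by
  intro llm _
  show parse_rebalancing_plan_py llm = parse_rebalancing_plan_py_alt llm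
  show (pvFinish (((PySem.Str.split? llm "\n").getD []).foldl pvStepA
        (PySem.Dict.empty, none, []))).items = _
  have h : ((PySem.Str.split? llm "\n").getD []).foldl pvStepA (PySem.Dict.empty, none, []) =
      (((PySem.Str.split? llm "\n").getD []).map PySem.Str.strip).foldl pvStepA'
        (PySem.Dict.empty, none, []) := by
    rw [List.foldl_map]; rfl
  rw [h, pvRun_none]
  rfl
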